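-- pv_equiv track=rewrite | github.com/iago-r/network-security | Authentication_ZAP_GT_CRIVO/urls_login/urls_login.py | find_urls_login
-- ===== SOURCE A (Python) =====
-- def find_urls_login(lista_strings, lista_palavras):
--     # Lista para armazenar as strings que contêm alguma das palavras
--     strings_encontradas = []
--
--     # Itera sobre cada string na lista de strings
--     for string in lista_strings:
--         # Itera sobre cada palavra na lista de palavras
--         for palavra in lista_palavras:
--             # Verifica se a palavra está presente na string
--             if palavra in string:
--                 # Adiciona a string à lista de resultados e sai do loop interno
--                 strings_encontradas.append(string)
--                 break
--
--     return strings_encontradas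
-- ===== SOURCE B (Python) =====
-- def _has_any(s, palavras):
--     # single left-to-right scan of s: at each offset test all keywords at once
--     # (str.startswith accepts a tuple of prefixes)
--     ps = tuple(palavras)
--     return any(s.startswith(ps, j) for j in range(len(s) + 1))
--
--
-- def find_urls_login(lista_strings, lista_palavras):
--     return [s for s in lista_strings if _has_any(s, lista_palavras)]
-- ===== Notes on version B (the rewrite author's own statement) =====
-- stated objective: alternative
-- what changed: A tests each keyword separately with Python's substring operator and breaks out of a word-loop; B makes one position-by-position scan of each string, testing all keywords as prefixes at each offset, and builds the result as a comprehension/filter.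
import Mathlib
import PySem

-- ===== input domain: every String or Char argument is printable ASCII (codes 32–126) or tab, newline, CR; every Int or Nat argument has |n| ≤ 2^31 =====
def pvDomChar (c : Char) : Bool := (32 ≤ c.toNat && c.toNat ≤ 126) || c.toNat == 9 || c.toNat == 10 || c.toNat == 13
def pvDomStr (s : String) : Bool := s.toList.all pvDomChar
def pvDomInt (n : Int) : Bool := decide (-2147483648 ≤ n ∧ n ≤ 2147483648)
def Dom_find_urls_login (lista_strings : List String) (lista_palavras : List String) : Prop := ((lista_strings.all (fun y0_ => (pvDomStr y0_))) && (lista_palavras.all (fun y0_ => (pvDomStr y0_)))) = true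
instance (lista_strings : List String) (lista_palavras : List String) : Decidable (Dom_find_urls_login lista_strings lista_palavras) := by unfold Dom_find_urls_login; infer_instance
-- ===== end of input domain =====

-- B replaces A's per-keyword substring tests (word-outer loop with break) by a single
-- position-by-position scan of each string, testing all keywords as prefixes at each offset
-- (objective: alternative; same cost).

-- ===== PORT A =====
-- inner 'for palavra in lista_palavras: if palavra in string: … break'
def pvInnerA (s : String) (ws : List String) : Bool :=
  match ws with
  | [] => false
  | w :: rest => if PySem.Str.isIn w s then true else pvInnerA s rest

def find_urls_login (lista_strings : List String) (lista_palavras : List String) : List String :=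
  lista_strings.foldl (fun acc s => if pvInnerA s lista_palavras then acc ++ [s] else acc) []

-- ===== PORT B =====
-- s.startswith(tuple(palavras), j) = does any keyword start at offset j; ported by hand as
-- 'any keyword's char list isPrefixOf the suffix of s at j' (exact: j ranges over 0..len(s))
def pvMatchesAt (cs : List Char) (ws : List String) : Bool :=
  ws.any (fun w => w.toList.isPrefixOf cs)

-- any(… for j in range(len(s)+1)): scan of the successive suffixes
def pvHasAny (cs : List Char) (ws : List String) : Bool :=
  match cs with
  | [] => pvMatchesAt [] ws
  | _ :: rest => pvMatchesAt cs ws || pvHasAny rest ws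

def find_urls_login_alt (lista_strings : List String) (lista_palavras : List String) : List String :=
  lista_strings.filter (fun s => pvHasAny s.toList lista_palavras)

-- ===== PRECONDITION & SPEC =====
def Spec_find_urls_login (lista_strings : List String) (lista_palavras : List String) (out : List String) : Prop := out = find_urls_login_alt lista_strings lista_palavras
instance (lista_strings : List String) (lista_palavras : List String) (out : List String) : Decidable (Spec_find_urls_login lista_strings lista_palavras out) := by unfold Spec_find_urls_login; infer_instance

-- ===== CLAIM (what is proved, stated in full; the proofs are below) =====
def Claim_equal_find_urls_login : Prop := ∀ (lista_strings : List String) (lista_palavras : List String), Dom_find_urls_login lista_strings lista_palavras → Spec_find_urls_login lista_strings lista_palavras (find_urls_login lista_strings lista_palavras)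

-- ===== LEMMAS AND PROOFS =====
theorem pvInnerA_iff (s : String) (ws : List String) :
    pvInnerA s ws = true ↔ ∃ w ∈ ws, w.toList <:+: s.toList := by
  induction ws with
  | nil => simp [pvInnerA]
  | cons w rest ih =>
      rcases h : PySem.Chars.isIn w.toList s.toList with _ | _
      · have h' : ¬ w.toList <:+: s.toList := (PySem.Chars.isIn_eq_false_iff _ _).mp h
        simp [pvInnerA, h, ih, h']
      · have h' : w.toList <:+: s.toList := (PySem.Chars.isIn_iff_infix _ _).mp h
        simp [pvInnerA, h, h']

theorem pvMatchesAt_iff (cs : List Char) (ws : List String) :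
    pvMatchesAt cs ws = true ↔ ∃ w ∈ ws, w.toList <+: cs := by
  simp [pvMatchesAt, List.isPrefixOf_iff_prefix]

theorem pvHasAny_iff (cs : List Char) (ws : List String) :
    pvHasAny cs ws = true ↔ ∃ t, t <:+ cs ∧ ∃ w ∈ ws, w.toList <+: t := by
  induction cs with
  | nil =>
      simp [pvHasAny, pvMatchesAt_iff]
  | cons c rest ih =>
      simp only [pvHasAny, Bool.or_eq_true, pvMatchesAt_iff, ih]
      constructor
      · rintro (h | ⟨t, ht, hw⟩)
        · exact ⟨c :: rest, List.suffix_refl _, h⟩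
        · exact ⟨t, ht.trans (List.suffix_cons c rest), hw⟩
      · rintro ⟨t, ht, hw⟩
        rcases List.suffix_cons_iff.mp ht with h | h
        · exact Or.inl (h ▸ hw)
        · exact Or.inr ⟨t, h, hw⟩

theorem pvInnerA_eq_pvHasAny (s : String) (ws : List String) :
    pvInnerA s ws = pvHasAny s.toList ws := by
  rcases h : pvHasAny s.toList ws with _ | _
  · rcases h' : pvInnerA s ws with _ | _
    · rfl
    · obtain ⟨w, hw, hinf⟩ := (pvInnerA_iff s ws).mp h'
      obtain ⟨t, hpre, hsuf⟩ := List.infix_iff_prefix_suffix.mp hinf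
      have : pvHasAny s.toList ws = true := (pvHasAny_iff _ _).mpr ⟨t, hsuf, w, hw, hpre⟩
      simp [this] at h
  · obtain ⟨t, hsuf, w, hw, hpre⟩ := (pvHasAny_iff _ _).mp h
    exact (pvInnerA_iff s ws).mpr ⟨w, hw, List.infix_iff_prefix_suffix.mpr ⟨t, hpre, hsuf⟩⟩

-- ===== VERDICT (by name: the statement is the Claim_ definition above) =====
theorem find_urls_login_spec : Claim_equal_find_urls_login := by
  intro ls ws _
  unfold Spec_find_urls_login find_urls_login find_urls_login_alt
  rw [PySem.List.foldl_append_if_eq_filter]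
  simp [pvInnerA_eq_pvHasAny]
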